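-- pv_equiv track=rewrite | github.com/alexlee92/stella | agent/tooling.py | is_command_allowed
-- ===== SOURCE A (Python) =====
-- import shlex
--
-- _ALLOWED_COMMAND_PREFIXES = [
--     ["pytest"],
--     ["python", "-m", "pytest"],
--     ["python", "-m", "ruff"],
--     ["python", "-m", "black"],
--     ["python", "-m", "mypy"],
--     ["python", "-m", "bandit"],
--     ["python", "-m", "pip", "install"],
--     ["python", "-m", "pip", "list"],
--     ["pip", "install"],
--     ["pip", "list"],
--     ["npm", "install"],
--     ["npm", "test"],
--     ["npm", "run"],
--     ["node"],
--     ["python"],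
--     ["git", "status"],
--     ["git", "log"],
--     ["git", "diff"],
--     ["git", "blame"],
--     ["git", "stash"],
-- ]
--
-- def is_command_allowed(command: str) -> bool:
--     try:
--         tokens = shlex.split(command)
--     except ValueError:
--         return False
--     if not tokens:
--         return False
--     for prefix in _ALLOWED_COMMAND_PREFIXES:
--         if tokens[: len(prefix)] == prefix:
--             return True
--     return False
-- ===== SOURCE B (Python) =====
-- import re
--
-- _ALLOWED_COMMAND_PREFIXES = [
--     ["pytest"],
--     ["python", "-m", "pytest"],
--     ["python", "-m", "ruff"],
--     ["python", "-m", "black"],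
--     ["python", "-m", "mypy"],
--     ["python", "-m", "bandit"],
--     ["python", "-m", "pip", "install"],
--     ["python", "-m", "pip", "list"],
--     ["pip", "install"],
--     ["pip", "list"],
--     ["npm", "install"],
--     ["npm", "test"],
--     ["npm", "run"],
--     ["node"],
--     ["python"],
--     ["git", "status"],
--     ["git", "log"],
--     ["git", "diff"],
--     ["git", "blame"],
--     ["git", "stash"],
-- ]
--
-- # one syntactic piece of a shell word: a bare run, a quoted segment, or an escape
-- _PART = re.compile(r"""[^\s'"\\]+|'[^']*'|"(?:[^"\\]|\\.)*"|\\.""", re.DOTALL)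
--
-- _WHITESPACE = " \t\r\n"
--
--
-- def _unquote(part):
--     if part.startswith("'"):
--         return part[1:-1]
--     if part.startswith('"'):
--         return re.sub(r'\\([\\"])', r"\1", part[1:-1])
--     if part.startswith("\\"):
--         return part[1]
--     return part
--
--
-- def _shell_words(command):
--     """POSIX shell word splitting; None if the command is malformed
--     (unclosed quote or dangling backslash)."""
--     words = []
--     i, n = 0, len(command)
--     while i < n:
--         if command[i] in _WHITESPACE:
--             i += 1
--             continue
--         parts = []
--         while i < n and command[i] not in _WHITESPACE:
--             m = _PART.match(command, i)
--             if m is None: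
--                 return None
--             parts.append(_unquote(m.group()))
--             i = m.end()
--         words.append("".join(parts))
--     return words
--
--
-- def _build_trie(prefixes):
--     root = {}
--     for prefix in prefixes:
--         node = root
--         for token in prefix:
--             node = node.setdefault(token, {})
--         node[None] = True  # terminal: an allowed prefix ends here
--     return root
--
--
-- _TRIE = _build_trie(_ALLOWED_COMMAND_PREFIXES)
--
--
-- def is_command_allowed(command: str) -> bool:
--     tokens = _shell_words(command)
--     if not tokens:
--         return False
--     node = _TRIE
--     for token in tokens:
--         if None in node:
--             return True
--         node = node.get(token)
--         if node is None:
--             return False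
--     return None in node
-- ===== Notes on version B (the rewrite author's own statement) =====
-- stated objective: faster
-- what changed: B replaces shlex.split with a compiled-regex part matcher (bare run / quoted segment / escape, joined into words) and replaces A's slice-and-compare scan over all 20 allowed prefixes with a single walk of the token list through a prefix trie built from the allow-list.
import Mathlib
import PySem

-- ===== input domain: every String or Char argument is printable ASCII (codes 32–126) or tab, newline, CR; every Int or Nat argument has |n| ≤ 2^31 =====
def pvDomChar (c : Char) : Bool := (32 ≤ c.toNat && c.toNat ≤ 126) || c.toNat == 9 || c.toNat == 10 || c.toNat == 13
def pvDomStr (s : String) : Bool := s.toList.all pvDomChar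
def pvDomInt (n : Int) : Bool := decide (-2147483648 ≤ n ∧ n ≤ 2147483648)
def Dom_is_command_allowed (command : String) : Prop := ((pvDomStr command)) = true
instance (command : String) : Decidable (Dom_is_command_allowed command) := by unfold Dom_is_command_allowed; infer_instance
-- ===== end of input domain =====

-- B tokenizes with a regex-style part matcher (bare run / quoted segment / escape,
-- ported by hand, exact on the ASCII domain) and walks the token list once through a
-- prefix trie built from the allow-list, instead of A's character-state shlex scan
-- followed by a slice-and-compare pass over all 20 allowed prefixes.

def pvIsWS (c : Char) : Bool := c == ' ' || c == '\t' || c == '\r' || c == '\n'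

-- ===== PORT A =====
-- shlex.split (posix, whitespace_split), ported by hand step for step; exact on the
-- printable-ASCII(+tab/newline/CR) domain; returns none exactly where Python raises
-- ValueError (unclosed quote / trailing backslash), which A catches and turns into False.

-- read until the closing single quote; none = no closing quotation
def pvReadSingle : List Char → Option (List Char × List Char)
  | [] => none
  | c :: rest =>
    if c = '\'' then some ([], rest)
    else (pvReadSingle rest).map (fun p => (c :: p.1, p.2))

-- read until the closing double quote; backslash escapes only '"' and '\'
def pvReadDouble : List Char → Option (List Char × List Char)
  | [] => none
  | c :: rest =>
    if c = '"' then some ([], rest)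
    else if c = '\\' then
      match rest with
      | [] => none
      | e :: rest' =>
        (pvReadDouble rest').map
          (fun p => ((if e = '"' ∨ e = '\\' then [e] else ['\\', e]) ++ p.1, p.2))
    else (pvReadDouble rest).map (fun p => (c :: p.1, p.2))

theorem pvReadSingle_len : ∀ (l : List Char) s r, pvReadSingle l = some (s, r) → r.length < l.length := by
  intro l
  induction l with
  | nil => intro s r h; simp [pvReadSingle] at h
  | cons c rest ih =>
    intro s r h
    simp only [pvReadSingle] at h
    split at h
    · simp at h
      obtain ⟨-, rfl⟩ := h
      simp
    · simp only [Option.map_eq_some_iff] at h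
      obtain ⟨⟨s', r'⟩, hp, he⟩ := h
      have := ih s' r' hp
      cases he; simp; omega

theorem pvReadDouble_len_aux : ∀ (n : Nat) (l : List Char), l.length ≤ n → ∀ s r, pvReadDouble l = some (s, r) → r.length < l.length := by
  intro n
  induction n with
  | zero =>
    intro l hl s r h
    match l, hl with
    | [], _ => simp [pvReadDouble] at h
  | succ n ih =>
    intro l hl s r h
    match l, hl, h with
    | [], _, h => simp [pvReadDouble] at h
    | c :: rest, hl, h =>
      rw [pvReadDouble.eq_def] at h
      dsimp only at h
      split at h
      · simp at h
        obtain ⟨-, rfl⟩ := h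
        simp
      · split at h
        · match rest, hl, h with
          | [], _, h => simp at h
          | e :: rest', hl, h =>
            simp only [Option.map_eq_some_iff] at h
            obtain ⟨⟨s', r'⟩, hp, he⟩ := h
            have := ih rest' (by simp at hl ⊢; omega) s' r' hp
            cases he; simp; omega
        · simp only [Option.map_eq_some_iff] at h
          obtain ⟨⟨s', r'⟩, hp, he⟩ := h
          have := ih rest (by simp at hl ⊢; omega) s' r' hp
          cases he; simp; omega

theorem pvReadDouble_len (l : List Char) (s r : List Char) (h : pvReadDouble l = some (s, r)) : r.length < l.length :=
  pvReadDouble_len_aux l.length l (le_refl _) s r h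

-- the main scanner: cur = token under construction (none ⇒ no token open)
def pvSplitLoop : List Char → Option (List Char) → List String → Option (List String)
  | [], cur, acc =>
    some (acc ++ (match cur with | some t => [String.ofList t] | none => []))
  | c :: rest, cur, acc =>
    if pvIsWS c then
      pvSplitLoop rest none (acc ++ (match cur with | some t => [String.ofList t] | none => []))
    else if c = '\'' then
      match h : pvReadSingle rest with
      | none => none
      | some (s, r) =>
        pvSplitLoop r (some (cur.getD [] ++ s)) acc
    else if c = '"' then
      match h : pvReadDouble rest with
      | none => none
      | some (s, r) =>
        pvSplitLoop r (some (cur.getD [] ++ s)) acc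
    else if c = '\\' then
      match rest with
      | [] => none
      | e :: r => pvSplitLoop r (some (cur.getD [] ++ [e])) acc
    else
      pvSplitLoop rest (some (cur.getD [] ++ [c])) acc
  termination_by l _ _ => l.length
  decreasing_by
  all_goals first
    | (have := pvReadSingle_len _ _ _ h; simp; omega)
    | (have := pvReadDouble_len _ _ _ h; simp; omega)
    | (simp; try omega)

def pvShlexSplit? (command : String) : Option (List String) :=
  pvSplitLoop command.toList none []

-- the allow-list, shared by both ports (each Python holds the same literal list)
def allowedCommandPrefixes : List (List String) :=
  [ ["pytest"],
    ["python", "-m", "pytest"],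
    ["python", "-m", "ruff"],
    ["python", "-m", "black"],
    ["python", "-m", "mypy"],
    ["python", "-m", "bandit"],
    ["python", "-m", "pip", "install"],
    ["python", "-m", "pip", "list"],
    ["pip", "install"],
    ["pip", "list"],
    ["npm", "install"],
    ["npm", "test"],
    ["npm", "run"],
    ["node"],
    ["python"],
    ["git", "status"],
    ["git", "log"],
    ["git", "diff"],
    ["git", "blame"],
    ["git", "stash"] ]

def is_command_allowed (command : String) : Bool :=
  match pvShlexSplit? command with
  | none => false
  | some tokens =>
    if tokens = [] then false
    else allowedCommandPrefixes.any
      (fun prefix_ => PySem.List.slice tokens none (some (PySem.List.len prefix_)) == prefix_)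

-- ===== PORT B =====
-- the regex _PART = [^\s'"\\]+ | '[^']*' | "(?:[^"\\]|\\.)*" | \\.  ported by hand
-- (alternation tried in order, greedy runs); exact on the ASCII domain.

-- a character of a bare run: [^\s'"\\]
def isBare (c : Char) : Bool := !(pvIsWS c) && c != '\'' && c != '"' && c != '\\'

-- body of '[^']*' after the opening quote; none = the regex does not match
def scanQuote : List Char → Option (List Char × List Char)
  | [] => none
  | c :: rest =>
    if c = '\'' then some ([], rest)
    else (scanQuote rest).map (fun p => (c :: p.1, p.2))

-- body of "(?:[^"\\]|\\.)*" after the opening quote, kept RAW (escapes untouched)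
def scanDq : List Char → Option (List Char × List Char)
  | [] => none
  | c :: rest =>
    if c = '"' then some ([], rest)
    else if c = '\\' then
      match rest with
      | [] => none
      | e :: rest' => (scanDq rest').map (fun p => ('\\' :: e :: p.1, p.2))
    else (scanDq rest).map (fun p => (c :: p.1, p.2))

-- _PART.match: the matched part (raw, quotes/escapes included) and the remainder
def matchPart : List Char → Option (List Char × List Char)
  | [] => none
  | c :: rest =>
    if isBare c then some (c :: rest.takeWhile isBare, rest.dropWhile isBare)
    else if c = '\'' then (scanQuote rest).map (fun p => ('\'' :: p.1 ++ ['\''], p.2))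
    else if c = '"' then (scanDq rest).map (fun p => ('"' :: p.1 ++ ['"'], p.2))
    else if c = '\\' then
      match rest with
      | [] => none
      | e :: r => some (['\\', e], r)
    else none

-- re.sub(r'\\([\\"])', r'\1', ·) ported as the left-to-right scan it performs; exact
def pvSub : List Char → List Char
  | [] => []
  | c :: r =>
    if c = '\\' then
      match r with
      | [] => [c]
      | e :: r' => if e = '\\' ∨ e = '"' then e :: pvSub r' else c :: pvSub (e :: r')
    else c :: pvSub r
  termination_by l => l.length

-- _unquote: the startswith chain of Source B
def unquote (part : List Char) : List Char :=
  match part with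
  | [] => []
  | c :: rest =>
    if c = '\'' then rest.dropLast
    else if c = '"' then pvSub rest.dropLast
    else if c = '\\' then rest.take 1
    else part

theorem scanQuote_len : ∀ (l : List Char) s r, scanQuote l = some (s, r) → r.length < l.length := by
  intro l
  induction l with
  | nil => intro s r h; simp [scanQuote] at h
  | cons c rest ih =>
    intro s r h
    simp only [scanQuote] at h
    split at h
    · simp at h
      obtain ⟨-, rfl⟩ := h
      simp
    · simp only [Option.map_eq_some_iff] at h
      obtain ⟨⟨s', r'⟩, hp, he⟩ := h
      have := ih s' r' hp
      cases he; simp; omega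

theorem scanDq_len_aux : ∀ (n : Nat) (l : List Char), l.length ≤ n → ∀ s r, scanDq l = some (s, r) → r.length < l.length := by
  intro n
  induction n with
  | zero =>
    intro l hl s r h
    match l, hl with
    | [], _ => simp [scanDq] at h
  | succ n ih =>
    intro l hl s r h
    match l, hl, h with
    | [], _, h => simp [scanDq] at h
    | c :: rest, hl, h =>
      rw [scanDq.eq_def] at h
      dsimp only at h
      split at h
      · simp at h
        obtain ⟨-, rfl⟩ := h
        simp
      · split at h
        · match rest, hl, h with
          | [], _, h => simp at h
          | e :: rest', hl, h =>
            simp only [Option.map_eq_some_iff] at h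
            obtain ⟨⟨s', r'⟩, hp, he⟩ := h
            have := ih rest' (by simp at hl ⊢; omega) s' r' hp
            cases he; simp; omega
        · simp only [Option.map_eq_some_iff] at h
          obtain ⟨⟨s', r'⟩, hp, he⟩ := h
          have := ih rest (by simp at hl ⊢; omega) s' r' hp
          cases he; simp; omega

theorem scanDq_len (l : List Char) (s r : List Char) (h : scanDq l = some (s, r)) : r.length < l.length :=
  scanDq_len_aux l.length l (le_refl _) s r h

theorem matchPart_len : ∀ (l : List Char) p r, matchPart l = some (p, r) → r.length < l.length := by
  intro l p r h
  match l, h with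
  | c :: rest, h =>
    rw [matchPart.eq_def] at h
    dsimp only at h
    split at h
    · simp at h
      obtain ⟨-, rfl⟩ := h
      have := List.length_dropWhile_le isBare rest
      simp; omega
    · split at h
      · simp only [Option.map_eq_some_iff] at h
        obtain ⟨⟨s', r'⟩, hp, he⟩ := h
        have := scanQuote_len rest s' r' hp
        cases he; simp; omega
      · split at h
        · simp only [Option.map_eq_some_iff] at h
          obtain ⟨⟨s', r'⟩, hp, he⟩ := h
          have := scanDq_len rest s' r' hp
          cases he; simp; omega
        · split at h
          · match rest, h with
            | e :: r', h =>
              simp at h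
              obtain ⟨-, rfl⟩ := h
              simp
          · simp at h

-- the inner while loop of _shell_words: consume adjacent parts into one word
def word : List Char → Option (List Char × List Char)
  | [] => some ([], [])
  | c :: rest =>
    if pvIsWS c then some ([], c :: rest)
    else
      match h : matchPart (c :: rest) with
      | none => none
      | some (p, r) => (word r).map (fun q => (unquote p ++ q.1, q.2))
  termination_by l => l.length
  decreasing_by have := matchPart_len _ _ _ h; simp at this ⊢; omega

theorem word_len_le : ∀ (n : Nat) (l : List Char), l.length ≤ n → ∀ w r, word l = some (w, r) → r.length ≤ l.length := by
  intro n
  induction n with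
  | zero =>
    intro l hl w r h
    match l, hl with
    | [], _ => simp [word] at h; obtain ⟨-, rfl⟩ := h; simp
  | succ n ih =>
    intro l hl w r h
    match l, h with
    | [], h => simp [word] at h; obtain ⟨-, rfl⟩ := h; simp
    | c :: rest, h =>
      rw [word.eq_def] at h
      dsimp only at h
      split at h
      · simp at h
        obtain ⟨-, rfl⟩ := h
        simp
      · split at h
        · simp at h
        · rename_i p r1 hm
          simp only [Option.map_eq_some_iff] at h
          obtain ⟨⟨w', r'⟩, hw, he⟩ := h
          have h1 := matchPart_len _ _ _ hm
          have h2 := ih r1 (by simp at h1 hl ⊢; omega) w' r' hw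
          have hr2 : r = r' := (congrArg Prod.snd he).symm
          subst hr2
          simp at h1 ⊢
          omega

theorem word_len_lt (c : Char) (rest : List Char) (hc : ¬ pvIsWS c = true) (w : List Char) (r : List Char)
    (h : word (c :: rest) = some (w, r)) : r.length < (c :: rest).length := by
  rw [word.eq_def] at h
  dsimp only at h
  rw [if_neg hc] at h
  split at h
  · simp at h
  · rename_i p r1 hm
    simp only [Option.map_eq_some_iff] at h
    obtain ⟨⟨w', r'⟩, hw, he⟩ := h
    have h1 := matchPart_len _ _ _ hm
    have h2 := word_len_le r1.length r1 (le_refl _) w' r' hw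
    have hr2 : r = r' := (congrArg Prod.snd he).symm
    subst hr2
    omega

-- the outer loop of _shell_words: skip whitespace, collect words
def shellWords : List Char → Option (List String)
  | [] => some []
  | c :: rest =>
    if h : pvIsWS c then shellWords rest
    else
      match h2 : word (c :: rest) with
      | none => none
      | some (w, r) => (shellWords r).map (fun ts => String.ofList w :: ts)
  termination_by l => l.length
  decreasing_by
  · simp
  · have := word_len_lt c rest h _ _ h2; simp at this ⊢; omega

-- a trie over token lists; terminal flag = an allowed prefix ends at this node
-- (explicit child list via a mutual pair — no nested inductive)
mutual
inductive Trie where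
  | node : Bool → TrieKids → Trie
inductive TrieKids where
  | nil : TrieKids
  | cons : String → Trie → TrieKids → TrieKids
end

-- node.get(token)
def lookupKid : TrieKids → String → Option Trie
  | .nil, _ => none
  | .cons k t rest, s => if k = s then some t else lookupKid rest s

-- dict write: replace the existing child in place, else append (setdefault order)
def setKid : TrieKids → String → Trie → TrieKids
  | .nil, s, t => .cons s t .nil
  | .cons k t0 rest, s, t =>
    if k = s then .cons k t rest else .cons k t0 (setKid rest s t)

-- the inner loop of _build_trie for one prefix: descend (creating missing nodes),
-- then mark the final node terminal
def trieInsert : Trie → List String → Trie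
  | .node _ ch, [] => .node true ch
  | .node b ch, s :: rest =>
    .node b (setKid ch s (trieInsert ((lookupKid ch s).getD (.node false .nil)) rest))

-- _TRIE = _build_trie(_ALLOWED_COMMAND_PREFIXES)
def buildTrie : Trie := allowedCommandPrefixes.foldl trieInsert (.node false .nil)

-- the token loop of is_command_allowed: accept on a terminal node, stop on a miss
def walkTrie : List String → Trie → Bool
  | [], .node b _ => b
  | s :: rest, .node b ch =>
    if b then true
    else
      match lookupKid ch s with
      | none => false
      | some c => walkTrie rest c

def is_command_allowed_alt (command : String) : Bool :=
  match shellWords command.toList with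
  | none => false
  | some tokens =>
    if tokens = [] then false
    else walkTrie tokens buildTrie

-- ===== PRECONDITION & SPEC =====
def Spec_is_command_allowed (command : String) (out : Bool) : Prop := out = is_command_allowed_alt command
instance (command : String) (out : Bool) : Decidable (Spec_is_command_allowed command out) := by unfold Spec_is_command_allowed; infer_instance

-- ===== CLAIM (what is proved, stated in full; the proofs are below) =====
def Claim_equal_is_command_allowed : Prop := ∀ (command : String), Dom_is_command_allowed command → Spec_is_command_allowed command (is_command_allowed command)

-- ===== LEMMAS AND PROOFS =====

-- ---- tokenizer equivalence: pvSplitLoop (A's shlex scan) vs shellWords (B's parts) ----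

theorem scanQuote_eq_readSingle : ∀ (l : List Char), scanQuote l = pvReadSingle l := by
  intro l
  induction l with
  | nil => rfl
  | cons c rest ih => simp only [scanQuote, pvReadSingle, ih]

theorem pvSub_nil : pvSub [] = [] := by rw [pvSub.eq_def]

theorem pvSub_esc (e : Char) (r : List Char) :
    pvSub ('\\' :: e :: r) = if e = '\\' ∨ e = '"' then e :: pvSub r else '\\' :: pvSub (e :: r) := by
  rw [pvSub.eq_def]
  simp

theorem pvSub_cons_ne (c : Char) (l : List Char) (hc : ¬ c = '\\') :
    pvSub (c :: l) = c :: pvSub l := by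
  rw [pvSub.eq_def]
  simp [hc]

-- pvReadDouble processes escapes on the fly; scanDq keeps them raw and pvSub applies them
theorem readDouble_eq_sub_scanDq : ∀ (n : Nat) (l : List Char), l.length ≤ n →
    pvReadDouble l = (scanDq l).map (fun p => (pvSub p.1, p.2)) := by
  intro n
  induction n with
  | zero =>
    intro l hl
    match l, hl with
    | [], _ => rfl
  | succ n ih =>
    intro l hl
    match l, hl with
    | [], _ => rfl
    | c :: rest, hl =>
      rw [pvReadDouble.eq_def, scanDq.eq_def]
      dsimp only
      by_cases h1 : c = '"'
      · simp [h1, pvSub_nil]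
      · simp only [if_neg h1]
        by_cases h2 : c = '\\'
        · simp only [if_pos h2]
          match rest with
          | [] => rfl
          | e :: rest' =>
            dsimp only
            rw [ih rest' (by simp at hl ⊢; omega)]
            cases hq : scanDq rest' with
            | none => rfl
            | some p =>
              simp only [Option.map_some]
              by_cases he : e = '"' ∨ e = '\\'
              · have he' : e = '\\' ∨ e = '"' := he.symm
                rw [pvSub_esc, if_pos he', if_pos he]
                rfl
              · have he' : ¬ (e = '\\' ∨ e = '"') := fun h => he h.symm
                have he2 : ¬ e = '\\' := fun h => he (Or.inr h)
                rw [pvSub_esc, if_neg he', pvSub_cons_ne e p.1 he2, if_neg he]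
                rfl
        · simp only [if_neg h2]
          rw [ih rest (by simp at hl ⊢; omega)]
          cases hq : scanDq rest with
          | none => rfl
          | some p => simp [pvSub_cons_ne c p.1 h2]

-- unquote on each shape of matched part
theorem unquote_quote (s : List Char) : unquote ('\'' :: (s ++ ['\''])) = s := by
  simp [unquote]

theorem unquote_dq (s : List Char) : unquote ('"' :: (s ++ ['"'])) = pvSub s := by
  simp [unquote]

theorem unquote_esc (e : Char) : unquote ['\\', e] = [e] := by
  simp [unquote]

theorem isBare_facts (c : Char) (hc : isBare c = true) :
    pvIsWS c = false ∧ ¬ c = '\'' ∧ ¬ c = '"' ∧ ¬ c = '\\' := by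
  simp [isBare] at hc
  exact ⟨hc.1.1.1, hc.1.1.2, hc.1.2, hc.2⟩

theorem unquote_bare (c : Char) (l : List Char) (hc : isBare c = true) :
    unquote (c :: l) = c :: l := by
  obtain ⟨-, h1, h2, h3⟩ := isBare_facts c hc
  simp [unquote, h1, h2, h3]

-- word equations
theorem word_nil : word [] = some ([], []) := by rw [word.eq_def]

theorem word_ws (c : Char) (rest : List Char) (h : pvIsWS c = true) :
    word (c :: rest) = some ([], c :: rest) := by
  rw [word.eq_def]; simp [h]

theorem word_step (c : Char) (rest : List Char) (h : ¬ pvIsWS c = true) :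
    word (c :: rest) =
      match matchPart (c :: rest) with
      | none => none
      | some (p, r) => (word r).map (fun q => (unquote p ++ q.1, q.2)) := by
  rw [word.eq_def]
  dsimp only
  rw [if_neg h]
  split
  next hm => rw [hm]
  next p r hm => rw [hm]

-- one bare character prepends itself to the word that follows
theorem word_cons_bare (c : Char) (rest : List Char) (hc : isBare c = true) :
    word (c :: rest) = (word rest).map (fun q => (c :: q.1, q.2)) := by
  obtain ⟨hws, -, -, -⟩ := isBare_facts c hc
  rw [word_step c rest (by simp [hws])]
  have hmp : matchPart (c :: rest) = some (c :: rest.takeWhile isBare, rest.dropWhile isBare) := by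
    simp [matchPart, hc]
  rw [hmp]
  dsimp only
  cases rest with
  | nil =>
    simp only [List.takeWhile_nil, List.dropWhile_nil, word_nil]
    simp [unquote_bare c _ hc]
  | cons d r2 =>
    by_cases hd : isBare d = true
    · obtain ⟨hwsd, -, -, -⟩ := isBare_facts d hd
      rw [List.takeWhile_cons_of_pos hd, List.dropWhile_cons_of_pos hd,
        word_step d r2 (by simp [hwsd])]
      have hmpd : matchPart (d :: r2) = some (d :: r2.takeWhile isBare, r2.dropWhile isBare) := by
        simp [matchPart, hd]
      rw [hmpd]
      dsimp only
      rw [Option.map_map]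
      apply Option.map_congr
      intro q hq
      simp [unquote_bare c _ hc, unquote_bare d _ hd]
    · rw [List.takeWhile_cons_of_neg (by simp [hd]), List.dropWhile_cons_of_neg (by simp [hd])]
      apply Option.map_congr
      intro q hq
      simp [unquote_bare c _ hc]

-- shellWords equations
theorem sw_nil : shellWords [] = some [] := by rw [shellWords.eq_def]

theorem sw_ws (c : Char) (rest : List Char) (h : pvIsWS c = true) :
    shellWords (c :: rest) = shellWords rest := by
  rw [shellWords.eq_def]; simp [h]

theorem sw_step (c : Char) (rest : List Char) (h : ¬ pvIsWS c = true) :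
    shellWords (c :: rest) =
      match word (c :: rest) with
      | none => none
      | some (w, r) => (shellWords r).map (fun ts => String.ofList w :: ts) := by
  rw [shellWords.eq_def]
  dsimp only
  rw [dif_neg h]
  split
  next hm => rw [hm]
  next w r hm => rw [hm]

-- with a non-whitespace head, an empty open token behaves like no open token
theorem splitLoop_none_some (c : Char) (rest : List Char) (acc : List String)
    (h : ¬ pvIsWS c = true) :
    pvSplitLoop (c :: rest) none acc = pvSplitLoop (c :: rest) (some []) acc := by
  rw [pvSplitLoop.eq_def, pvSplitLoop.eq_def]
  dsimp only
  rw [if_neg h, if_neg h]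
  simp only [Option.getD_none, Option.getD_some]

-- the bridge: A's scanner state (open token t, emitted acc) vs B's word/words structure
theorem bridge : ∀ (n : Nat) (l : List Char), l.length ≤ n →
    (∀ (t : List Char) (acc : List String),
      pvSplitLoop l (some t) acc =
        match word l with
        | none => none
        | some (w, r) => (shellWords r).map (fun ts => acc ++ String.ofList (t ++ w) :: ts)) ∧
    (∀ (acc : List String),
      pvSplitLoop l none acc = (shellWords l).map (fun ts => acc ++ ts)) := by
  intro n
  induction n with
  | zero =>
    intro l hl
    match l, hl with
    | [], _ =>
      refine ⟨fun t acc => ?_, fun acc => ?_⟩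
      · simp [pvSplitLoop, word_nil, sw_nil]
      · simp [pvSplitLoop, sw_nil]
  | succ n ih =>
    intro l hl
    match l, hl with
    | [], _ =>
      refine ⟨fun t acc => ?_, fun acc => ?_⟩
      · simp [pvSplitLoop, word_nil, sw_nil]
      · simp [pvSplitLoop, sw_nil]
    | c :: rest, hl =>
      have hrest : rest.length ≤ n := by simp at hl; omega
      have hL1 : ∀ (t : List Char) (acc : List String),
          pvSplitLoop (c :: rest) (some t) acc =
            match word (c :: rest) with
            | none => none
            | some (w, r) => (shellWords r).map (fun ts => acc ++ String.ofList (t ++ w) :: ts) := by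
        intro t acc
        rw [pvSplitLoop.eq_def]
        dsimp only
        by_cases hw : pvIsWS c = true
        · rw [if_pos hw, (ih rest hrest).2, word_ws c rest hw]
          dsimp only
          rw [sw_ws c rest hw]
          cases shellWords rest with
          | none => rfl
          | some ts => simp
        · rw [if_neg hw]
          by_cases h1 : c = '\''
          · rw [if_pos h1, word_step c rest hw]
            have hmp : matchPart (c :: rest)
                = (scanQuote rest).map (fun p => ('\'' :: p.1 ++ ['\''], p.2)) := by
              subst h1
              simp [matchPart, (by decide : isBare '\'' = false)]
            rw [hmp, ← scanQuote_eq_readSingle]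
            cases hq : scanQuote rest with
            | none => rfl
            | some p =>
              obtain ⟨s, r⟩ := p
              have hr : r.length ≤ n := by
                have := scanQuote_len rest s r hq; simp at hl; omega
              simp only [Option.map_some, Option.getD_some]
              rw [(ih r hr).1 (t ++ s) acc]
              have : '\'' :: s ++ ['\''] = '\'' :: (s ++ ['\'']) := by simp
              rw [this, unquote_quote]
              cases word r with
              | none => rfl
              | some q =>
                obtain ⟨w2, r2⟩ := q
                simp only [Option.map_some]
                cases shellWords r2 with
                | none => rfl
                | some ts => simp
          · rw [if_neg h1]
            by_cases h2 : c = '"'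
            · rw [if_pos h2, word_step c rest hw]
              have hmp : matchPart (c :: rest)
                  = (scanDq rest).map (fun p => ('"' :: p.1 ++ ['"'], p.2)) := by
                subst h2
                simp [matchPart, (by decide : isBare '"' = false),
                  (by decide : ¬ ('"' : Char) = '\'')]
              rw [hmp, readDouble_eq_sub_scanDq rest.length rest (le_refl _)]
              cases hq : scanDq rest with
              | none => rfl
              | some p =>
                obtain ⟨raw, r⟩ := p
                have hr : r.length ≤ n := by
                  have := scanDq_len rest raw r hq; simp at hl; omega
                simp only [Option.map_some, Option.getD_some]
                rw [(ih r hr).1 (t ++ pvSub raw) acc]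
                have : '"' :: raw ++ ['"'] = '"' :: (raw ++ ['"']) := by simp
                rw [this, unquote_dq]
                cases word r with
                | none => rfl
                | some q =>
                  obtain ⟨w2, r2⟩ := q
                  simp only [Option.map_some]
                  cases shellWords r2 with
                  | none => rfl
                  | some ts => simp
            · rw [if_neg h2]
              by_cases h3 : c = '\\'
              · rw [if_pos h3, word_step c rest hw]
                subst h3
                match rest with
                | [] =>
                  simp [matchPart, (by decide : isBare '\\' = false),
                    (by decide : ¬ ('\\' : Char) = '\''), (by decide : ¬ ('\\' : Char) = '"')]
                | e :: r =>
                  have hmp : matchPart ('\\' :: e :: r) = some (['\\', e], r) := by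
                    simp [matchPart, (by decide : isBare '\\' = false),
                      (by decide : ¬ ('\\' : Char) = '\''), (by decide : ¬ ('\\' : Char) = '"')]
                  rw [hmp]
                  simp only [Option.getD_some]
                  have hr : r.length ≤ n := by simp at hl; omega
                  rw [(ih r hr).1 (t ++ [e]) acc, unquote_esc]
                  cases word r with
                  | none => rfl
                  | some q =>
                    obtain ⟨w2, r2⟩ := q
                    simp only [Option.map_some]
                    cases shellWords r2 with
                    | none => rfl
                    | some ts => simp
              · rw [if_neg h3]
                have hb : isBare c = true := by
                  simp [isBare, h1, h2, h3, hw]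
                simp only [Option.getD_some]
                rw [(ih rest hrest).1 (t ++ [c]) acc, word_cons_bare c rest hb]
                cases word rest with
                | none => rfl
                | some q =>
                  obtain ⟨w2, r2⟩ := q
                  simp only [Option.map_some]
                  cases shellWords r2 with
                  | none => rfl
                  | some ts => simp
      refine ⟨hL1, fun acc => ?_⟩
      by_cases hw : pvIsWS c = true
      · rw [pvSplitLoop.eq_def]
        dsimp only
        rw [if_pos hw, sw_ws c rest hw]
        have := (ih rest hrest).2 acc
        simpa using this
      · rw [splitLoop_none_some c rest acc hw, hL1 [] acc, sw_step c rest hw]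
        cases word (c :: rest) with
        | none => rfl
        | some q =>
          obtain ⟨w, r⟩ := q
          simp only [Option.map_some]
          cases shellWords r with
          | none => rfl
          | some ts => simp

-- A's tokenizer and B's tokenizer agree
theorem shlex_eq_shellWords (command : String) :
    pvShlexSplit? command = shellWords command.toList := by
  have := (bridge command.toList.length command.toList (le_refl _)).2 []
  rw [pvShlexSplit?, this]
  cases shellWords command.toList with
  | none => rfl
  | some ts => simp

-- ---- trie correctness ----

theorem lookupKid_setKid : ∀ (ch : TrieKids) (x : String) (c : Trie) (s : String),
    lookupKid (setKid ch x c) s = if x = s then some c else lookupKid ch s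
  | .nil, x, c, s => by by_cases h : x = s <;> simp [setKid, lookupKid, h]
  | .cons k t0 rest, x, c, s => by
    have ih := lookupKid_setKid rest x c s
    by_cases hk : k = x
    · by_cases hs : x = s <;> simp [setKid, lookupKid, hk, hs]
    · by_cases hs : k = s
      · subst hs
        have h2 : ¬ x = k := fun h => hk h.symm
        simp [setKid, lookupKid, hk, h2]
      · simp [setKid, lookupKid, hk, hs, ih]

theorem walkTrie_empty (tokens : List String) :
    walkTrie tokens (.node false .nil) = false := by
  cases tokens <;> simp [walkTrie, lookupKid]

theorem walkTrie_insert : ∀ (p : List String) (t : Trie) (tokens : List String),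
    walkTrie tokens (trieInsert t p)
      = (walkTrie tokens t || decide (tokens.take p.length = p)) := by
  intro p
  induction p with
  | nil =>
    intro t tokens
    obtain ⟨b, ch⟩ := t
    cases tokens <;> simp [trieInsert, walkTrie]
  | cons x xs ih =>
    intro t tokens
    obtain ⟨b, ch⟩ := t
    cases tokens with
    | nil => simp [trieInsert, walkTrie]
    | cons s ts =>
      by_cases hb : b
      · simp [trieInsert, walkTrie, hb]
      · by_cases hx : x = s
        · subst hx
          simp only [trieInsert, walkTrie, lookupKid_setKid, hb, Bool.false_eq_true,
            if_false, List.length_cons, List.take_succ_cons, List.cons.injEq, true_and]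
          cases hl : lookupKid ch x with
          | none => simp [ih, walkTrie_empty]
          | some c => simp [ih]
        · have hne : decide ((s :: ts).take (x :: xs).length = x :: xs) = false := by
            simp [List.take_succ_cons]
            intro h; exact absurd h.symm hx
          simp only [trieInsert, walkTrie, lookupKid_setKid, if_neg hx, hb, Bool.false_eq_true,
            if_false, hne, Bool.or_false]

theorem walkTrie_foldl : ∀ (ps : List (List String)) (t : Trie) (tokens : List String),
    walkTrie tokens (ps.foldl trieInsert t)
      = (walkTrie tokens t || ps.any (fun p => decide (tokens.take p.length = p))) := by
  intro ps
  induction ps with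
  | nil => intro t tokens; simp
  | cons p ps ih =>
    intro t tokens
    simp only [List.foldl_cons, List.any_cons, ih, walkTrie_insert, Bool.or_assoc]

-- ===== VERDICT (by name: the statement is the Claim_ definition above) =====
theorem is_command_allowed_spec : Claim_equal_is_command_allowed := by
  intro command _
  unfold Spec_is_command_allowed is_command_allowed is_command_allowed_alt
  rw [shlex_eq_shellWords]
  cases hsp : shellWords command.toList with
  | none => rfl
  | some tokens =>
    by_cases hnil : tokens = []
    · simp [hnil]
    · simp only [if_neg hnil]
      have hslice : ∀ (L : ℕ), PySem.List.slice tokens none (some (L : Int)) = tokens.take L :=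
        fun L => PySem.List.slice_to_natCast tokens L
      have hA : allowedCommandPrefixes.any
          (fun prefix_ => PySem.List.slice tokens none (some (PySem.List.len prefix_)) == prefix_)
          = allowedCommandPrefixes.any (fun p => decide (tokens.take p.length = p)) :=
        List.any_congr rfl (fun p => by
          rw [PySem.List.len_eq, hslice p.length]
          exact Bool.beq_eq_decide_eq _ _)
      rw [hA, buildTrie, walkTrie_foldl, walkTrie_empty, Bool.false_or]
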